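-- pv_equiv track=rewrite | github.com/daniel-reich/turbo-robot | 87YxyfFJ4cw4DsrvB_13.py | generate_rug
-- ===== SOURCE A (Python) =====
-- def generate_rug(n):
--   h = range(n)
--   rug = [[n//2]*n for i in h]
--   for k in h[1:len(h)//2+1]:
--     x = h[k:n-k]
--     for i in h:
--       for j in h:
--         if i in x and j in x:
--           rug[i][j] -= 1
--   return rug
-- ===== SOURCE B (Python) =====
-- def generate_rug(n):
--     half = n // 2
--     return [[half - min(i, j, n - 1 - i, n - 1 - j) for j in range(n)]
--             for i in range(n)]
-- ===== Notes on version B (the rewrite author's own statement) =====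
-- stated objective: faster
-- what changed: A builds the grid and then, for each concentric ring, re-scans every cell of the grid decrementing those inside the ring; B computes each cell directly in one nested comprehension with a closed form (half of n, floored, minus the cell's distance to the nearest border).
import Mathlib
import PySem

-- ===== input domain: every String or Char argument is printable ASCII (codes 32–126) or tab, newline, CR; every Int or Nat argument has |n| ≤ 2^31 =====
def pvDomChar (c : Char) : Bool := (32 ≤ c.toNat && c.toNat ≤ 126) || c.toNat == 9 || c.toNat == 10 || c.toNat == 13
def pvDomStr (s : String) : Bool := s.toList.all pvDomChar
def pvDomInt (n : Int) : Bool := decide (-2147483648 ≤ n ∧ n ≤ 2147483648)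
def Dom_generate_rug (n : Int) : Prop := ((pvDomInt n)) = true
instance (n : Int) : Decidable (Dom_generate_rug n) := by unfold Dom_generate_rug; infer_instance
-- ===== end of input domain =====

-- B replaces A's per-ring re-scan of the whole grid by the closed form n//2 - min(i, j, n-1-i, n-1-j) per cell.


-- ===== PORT A =====
-- rug[i][j] -= 1  (exact here: i and j come from range(n), so they are nonnegative in-range indices)
def pvDecAt (rug : List (List Int)) (i j : Nat) : List (List Int) :=
  rug.modify i (fun row => row.modify j (fun v => v - 1))

def generate_rug (n : Int) : List (List Int) :=
  let h := PySem.List.pyRange 0 n 1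
  -- [[n//2]*n for i in h]  ([v]*n is empty for n ≤ 0, so .toNat is exact)
  let rug := h.map (fun _ => List.replicate n.toNat (PySem.Int.floordiv n 2))
  (PySem.List.slice h (some 1) (some (PySem.Int.floordiv (h.length : Int) 2 + 1))).foldl
    (fun rug k =>
      let x := PySem.List.slice h (some k) (some (n - k))
      h.foldl (fun rug i =>
        h.foldl (fun rug j =>
          if x.contains i && x.contains j then pvDecAt rug i.toNat j.toNat else rug) rug) rug)
    rug

-- ===== PORT B =====
def generate_rug_alt (n : Int) : List (List Int) :=
  let half := PySem.Int.floordiv n 2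
  (PySem.List.pyRange 0 n 1).map (fun i =>
    (PySem.List.pyRange 0 n 1).map (fun j =>
      half - min (min (min i j) (n - 1 - i)) (n - 1 - j)))

-- ===== PRECONDITION & SPEC =====
def Spec_generate_rug (n : Int) (out : List (List Int)) : Prop := out = generate_rug_alt n
instance (n : Int) (out : List (List Int)) : Decidable (Spec_generate_rug n out) := by unfold Spec_generate_rug; infer_instance

-- ===== CLAIM (what is proved, stated in full; the proofs are below) =====
def Claim_equal_generate_rug : Prop := ∀ (n : Int), Dom_generate_rug n → Spec_generate_rug n (generate_rug n)

-- ===== LEMMAS AND PROOFS =====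

-- entry (i,j) of a grid, as an Option
def pvGet2 (r : List (List Int)) (i j : Nat) : Option Int := (r[i]?).bind (fun row => row[j]?)

theorem pvGet2_dec (r : List (List Int)) (a b i j : Nat) :
    pvGet2 (pvDecAt r a b) i j
      = if i = a ∧ j = b then (pvGet2 r i j).map (· - 1) else pvGet2 r i j := by
  unfold pvGet2 pvDecAt
  by_cases hia : a = i
  · subst hia
    cases hr : r[a]? with
    | none => simp [hr]
    | some row =>
      simp only [List.getElem?_modify, hr, if_true, Option.bind_some, true_and]
      by_cases hjb : b = j
      · subst hjb; cases hrow : row[b]? <;> simp [hrow]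
      · rw [if_neg (fun h : j = b => hjb h.symm)]
        cases hrow : row[j]? <;> simp [hjb, hrow]
  · simp only [List.getElem?_modify, if_neg hia]
    rw [if_neg (by rintro ⟨h1, -⟩; exact hia h1.symm)]
    cases r[i]? <;> simp

theorem pvShape_dec (r : List (List Int)) (a b : Nat) :
    (pvDecAt r a b).map List.length = r.map List.length := by
  apply List.ext_getElem?
  intro i
  simp only [List.getElem?_map, pvDecAt, List.getElem?_modify]
  by_cases h : a = i
  · subst h; cases r[a]? <;> simp
  · simp [h]

theorem pvEqOfGet2 (r s : List (List Int))
    (hlen : r.map List.length = s.map List.length)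
    (hget : ∀ i j, pvGet2 r i j = pvGet2 s i j) : r = s := by
  apply List.ext_getElem?
  intro i
  have h1 : r[i]?.map List.length = s[i]?.map List.length := by
    rw [← List.getElem?_map, ← List.getElem?_map, hlen]
  cases hr : r[i]? with
  | none => cases hs : s[i]? with
    | none => rfl
    | some rows => rw [hr, hs] at h1; simp at h1
  | some rowr =>
    cases hs : s[i]? with
    | none => rw [hr, hs] at h1; simp at h1
    | some rows =>
      rw [hr, hs] at h1
      simp only [Option.map_some, Option.some.injEq] at h1
      have : rowr = rows := by
        apply List.ext_getElem?
        intro j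
        have := hget i j
        unfold pvGet2 at this
        rw [hr, hs] at this
        simpa using this
      rw [this]

theorem pvFoldJ (a : Nat) (P : Int → Bool) :
    ∀ (L : List Int), L.Nodup → (∀ z ∈ L, 0 ≤ z) →
    ∀ (r : List (List Int)) (i j : Nat),
    pvGet2 (L.foldl (fun r z => if P z then pvDecAt r a z.toNat else r) r) i j
      = if i = a ∧ (j : Int) ∈ L ∧ P (j : Int) = true
        then (pvGet2 r i j).map (· - 1) else pvGet2 r i j := by
  intro L
  induction L with
  | nil => intro _ _ r i j; simp
  | cons z L ih =>
    intro hnd hnn r i j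
    have hzL : z ∉ L := (List.nodup_cons.mp hnd).1
    have hz0 : 0 ≤ z := hnn z (by simp)
    have hjz : (j = z.toNat) ↔ ((j : Int) = z) := by omega
    simp only [List.foldl_cons]
    rw [ih (List.nodup_cons.mp hnd).2 (fun w hw => hnn w (by simp [hw]))]
    by_cases hPz : P z
    · simp only [hPz, if_true]
      rw [pvGet2_dec]
      by_cases hjzv : (j : Int) = z
      · have hjL : (j : Int) ∉ L := by rw [hjzv]; exact hzL
        by_cases hia : i = a <;> simp [hia, hjz, hjzv, hjL, hPz]
        exact fun h => absurd h hzL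
      · by_cases hjL : (j : Int) ∈ L <;>
          by_cases hia : i = a <;> simp [hia, hjz, hjzv, hjL]
    · have hPz2 : P z = false := by simpa using hPz
      simp only [hPz2, Bool.false_eq_true, if_false]
      by_cases hjzv : (j : Int) = z
      · simp [hjzv, hPz2]
      · simp [List.mem_cons, hjzv]

theorem pvFoldI (x h2 : List Int) (hnd2 : h2.Nodup) (hnn2 : ∀ z ∈ h2, 0 ≤ z) :
    ∀ (L : List Int), L.Nodup → (∀ z ∈ L, 0 ≤ z) →
    ∀ (r : List (List Int)) (i j : Nat),
    pvGet2 (L.foldl (fun r iz => h2.foldl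
        (fun r jz => if x.contains iz && x.contains jz then pvDecAt r iz.toNat jz.toNat else r) r) r) i j
      = if (i : Int) ∈ L ∧ x.contains (i : Int) = true ∧ (j : Int) ∈ h2 ∧ x.contains (j : Int) = true
        then (pvGet2 r i j).map (· - 1) else pvGet2 r i j := by
  intro L
  induction L with
  | nil => intro _ _ r i j; simp
  | cons z L ih =>
    intro hnd hnn r i j
    have hzL : z ∉ L := (List.nodup_cons.mp hnd).1
    have hz0 : 0 ≤ z := hnn z (by simp)
    have hiz : (i = z.toNat) ↔ ((i : Int) = z) := by omega
    simp only [List.foldl_cons]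
    rw [ih (List.nodup_cons.mp hnd).2 (fun w hw => hnn w (by simp [hw]))]
    rw [pvFoldJ z.toNat (fun jz => x.contains z && x.contains jz) h2 hnd2 hnn2]
    by_cases hizv : (i : Int) = z
    · have hiL : (i : Int) ∉ L := by rw [hizv]; exact hzL
      by_cases hxz : x.contains z <;>
        by_cases hjh : (j : Int) ∈ h2 <;>
        by_cases hxj : x.contains (j : Int) <;>
        simp [hiz, hizv, hiL, hxz, hjh, hxj]
      all_goals exact fun h => absurd h hzL
    · by_cases hiL : (i : Int) ∈ L <;>
        by_cases hxi : x.contains (i : Int) <;>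
        simp [hiz, hizv, hiL, hxi]

theorem pvFoldK (xf : Int → List Int) (h2 : List Int) (hnd : h2.Nodup) (hnn : ∀ z ∈ h2, 0 ≤ z) :
    ∀ (ks : List Int) (r : List (List Int)) (i j : Nat),
    pvGet2 (ks.foldl (fun r k => h2.foldl (fun r iz => h2.foldl
        (fun r jz => if (xf k).contains iz && (xf k).contains jz then pvDecAt r iz.toNat jz.toNat else r) r) r) r) i j
      = (pvGet2 r i j).map (fun v => v - (ks.countP (fun k =>
          decide ((i : Int) ∈ h2 ∧ (xf k).contains (i : Int) = true ∧ (j : Int) ∈ h2 ∧ (xf k).contains (j : Int) = true)) : Int)) := by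
  intro ks
  induction ks with
  | nil => intro r i j; cases h : pvGet2 r i j <;> simp [h]
  | cons k ks ih =>
    intro r i j
    simp only [List.foldl_cons]
    rw [ih, pvFoldI (xf k) h2 hnd hnn h2 hnd hnn]
    rw [List.countP_cons]
    by_cases hc : (i : Int) ∈ h2 ∧ (xf k).contains (i : Int) = true ∧ (j : Int) ∈ h2 ∧ (xf k).contains (j : Int) = true
    · rw [if_pos hc]
      simp only [hc, decide_true, if_pos]
      cases pvGet2 r i j <;> simp
      push_cast; ring
    · rw [if_neg hc]
      simp only [hc, decide_false]
      cases pvGet2 r i j <;> simp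

theorem pvCountRange (m : Int) : ∀ (Q : Nat),
    (List.range Q).countP (fun (t : Nat) => decide (1 + (t : Int) ≤ m)) = min Q m.toNat := by
  intro Q
  induction Q with
  | zero => simp
  | succ Q ih =>
    rw [List.range_succ, List.countP_append, ih]
    by_cases h : 1 + (Q : Int) ≤ m <;> simp [h] <;> omega

theorem pvCount (q m : Int) (h0 : 0 ≤ m) (hmq : m ≤ q) :
    (PySem.List.pyRange 1 (q + 1) 1).countP (fun k => decide (k ≤ m)) = m.toNat := by
  rw [PySem.List.pyRange_one, List.countP_map]
  have : ((fun k => decide (k ≤ m)) ∘ fun (t : Nat) => (1 : Int) + t) = fun (t : Nat) => decide (1 + (t : Int) ≤ m) := rfl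
  rw [this, pvCountRange]
  omega

theorem pvSliceRange (a b n : Int) (ha : 0 ≤ a) (hab : a ≤ b) (hbn : b ≤ n) :
    PySem.List.slice (PySem.List.pyRange 0 n 1) (some a) (some b) = PySem.List.pyRange a b 1 := by
  have h0b : (0:Int) ≤ b := le_trans ha hab
  rw [PySem.List.slice_toNat _ ha h0b]
  rw [PySem.List.pyRange_one_append 0 a n ha (le_trans hab hbn)]
  rw [PySem.List.pyRange_one_append a b n hab hbn]
  rw [List.drop_left' (by rw [PySem.List.length_pyRange_one]; omega)]
  rw [List.take_left' (by rw [PySem.List.length_pyRange_one]; omega)]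

theorem pvFoldl_preserve {α β γ : Type} (S : α → γ) (g : α → β → α)
    (hg : ∀ r z, S (g r z) = S r) : ∀ (L : List β) (r : α), S (L.foldl g r) = S r := by
  intro L
  induction L with
  | nil => intro r; rfl
  | cons z L ih => intro r; simp only [List.foldl_cons, ih, hg]

theorem pvGetMapRange {α : Type} (n : Int) (f : Int → α) (i : Nat) (hi : (i : Int) < n) :
    ((PySem.List.pyRange 0 n 1).map f)[i]? = some (f i) := by
  rw [PySem.List.pyRange_one]
  simp only [List.map_map, List.getElem?_map]
  rw [List.getElem?_range (show i < (n - 0).toNat by omega)]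
  simp

theorem pvGetMapRangeNone {α : Type} (n : Int) (f : Int → α) (i : Nat) (hi : ¬ (i : Int) < n) :
    ((PySem.List.pyRange 0 n 1).map f)[i]? = none := by
  apply List.getElem?_eq_none
  rw [List.length_map, PySem.List.length_pyRange_one]; omega

theorem pvMain (n : Int) : generate_rug n = generate_rug_alt n := by
  by_cases hn : n ≤ 0
  · simp only [generate_rug, generate_rug_alt, PySem.List.pyRange_one_eq_nil hn,
      List.map_nil, List.foldl_nil]
    induction PySem.List.slice ([] : List Int) (some 1) (some (PySem.Int.floordiv ((List.length ([] : List Int)) : Int) 2 + 1)) with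
    | nil => simp
    | cons a l ih => simpa using ih
  · push_neg at hn
    have hq : PySem.Int.floordiv n 2 = n / 2 := PySem.Int.floordiv_eq_ediv_of_pos (by norm_num)
    have hlen : ((PySem.List.pyRange 0 n 1).length : Int) = n := by
      rw [PySem.List.length_pyRange_one]; omega
    have hnd : (PySem.List.pyRange 0 n 1).Nodup := PySem.List.nodup_pyRange_one 0 n
    have hnn : ∀ z ∈ PySem.List.pyRange 0 n 1, 0 ≤ z := by
      intro z hz; exact (PySem.List.mem_pyRange_one.mp hz).1
    have hKS : PySem.List.slice (PySem.List.pyRange 0 n 1) (some 1)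
        (some (PySem.Int.floordiv ((PySem.List.pyRange 0 n 1).length : Int) 2 + 1))
        = PySem.List.pyRange 1 (n / 2 + 1) 1 := by
      rw [hlen, hq]
      exact pvSliceRange 1 (n/2+1) n (by norm_num) (by omega) (by omega)
    simp only [generate_rug, generate_rug_alt]
    rw [hKS]
    refine pvEqOfGet2 _ _ ?_ ?_
    · -- shapes agree
      refine Eq.trans (pvFoldl_preserve (fun r : List (List Int) => r.map List.length) _ ?_ _ _) ?_
      · intro r k
        refine pvFoldl_preserve (fun r : List (List Int) => r.map List.length) _ ?_ _ r
        intro r iz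
        refine pvFoldl_preserve (fun r : List (List Int) => r.map List.length) _ ?_ _ r
        intro r jz
        split
        · exact pvShape_dec _ _ _
        · rfl
      · simp only [List.map_map]
        apply List.map_congr_left
        intro z _
        simp [Function.comp, PySem.List.length_pyRange_one]
    · -- entries agree
      intro i j
      rw [pvFoldK (fun k => PySem.List.slice (PySem.List.pyRange 0 n 1) (some k) (some (n - k)))
        (PySem.List.pyRange 0 n 1) hnd hnn]
      by_cases hi : (i : Int) < n
      · by_cases hj : (j : Int) < n
        · -- in-range cell
          have hinit : pvGet2 ((PySem.List.pyRange 0 n 1).map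
              (fun _ => List.replicate n.toNat (PySem.Int.floordiv n 2))) i j
              = some (PySem.Int.floordiv n 2) := by
            unfold pvGet2
            rw [pvGetMapRange n _ i hi]
            simp [List.getElem?_replicate, show j < n.toNat by omega]
          have hcnt : (PySem.List.pyRange 1 (n / 2 + 1) 1).countP (fun k =>
              decide ((i : Int) ∈ PySem.List.pyRange 0 n 1 ∧
                (PySem.List.slice (PySem.List.pyRange 0 n 1) (some k) (some (n - k))).contains (i : Int) = true ∧
                (j : Int) ∈ PySem.List.pyRange 0 n 1 ∧
                (PySem.List.slice (PySem.List.pyRange 0 n 1) (some k) (some (n - k))).contains (j : Int) = true))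
              = (min (min (min (i : Int) (j : Int)) (n - 1 - i)) (n - 1 - j)).toNat := by
            rw [List.countP_congr (q := fun k => decide (k ≤ min (min (min (i : Int) (j : Int)) (n - 1 - i)) (n - 1 - j)))]
            · exact pvCount (n / 2) _ (by omega) (by omega)
            · intro k hk
              have hkm := PySem.List.mem_pyRange_one.mp hk
              rw [pvSliceRange k (n - k) n (by omega) (by omega) (by omega)]
              simp only [decide_eq_true_eq, List.contains_iff_mem, PySem.List.mem_pyRange_one]
              omega
          rw [hinit, hcnt]
          unfold pvGet2
          rw [pvGetMapRange n _ i hi]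
          simp only [Option.bind_some, Option.map_some]
          rw [pvGetMapRange n _ j hj]
          rw [hq]
          congr 1
          omega
        · -- j out of range: both none
          have hinit : pvGet2 ((PySem.List.pyRange 0 n 1).map
              (fun _ => List.replicate n.toNat (PySem.Int.floordiv n 2))) i j = none := by
            unfold pvGet2
            rw [pvGetMapRange n _ i hi]
            simp [List.getElem?_replicate, show ¬ j < n.toNat by omega]
          rw [hinit]
          unfold pvGet2
          rw [pvGetMapRange n _ i hi]
          simp only [Option.bind_some, Option.map_none]
          rw [List.getElem?_eq_none (by rw [List.length_map, PySem.List.length_pyRange_one]; omega)]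
      · -- i out of range: both none
        have hinit : pvGet2 ((PySem.List.pyRange 0 n 1).map
            (fun _ => List.replicate n.toNat (PySem.Int.floordiv n 2))) i j = none := by
          unfold pvGet2
          rw [pvGetMapRangeNone n _ i hi]
          rfl
        rw [hinit]
        unfold pvGet2
        rw [pvGetMapRangeNone n _ i hi]
        rfl

-- ===== VERDICT (by name: the statement is the Claim_ definition above) =====
theorem generate_rug_spec : Claim_equal_generate_rug := by
  intro n _
  unfold Spec_generate_rug
  exact pvMain n
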